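-- pv_equiv track=rewrite | github.com/HoneyMelon/small-projects | Python/projects/diagram.py | _get_min_max_for_multiple_datasets
-- ===== SOURCE A (Python) =====
-- def _get_min_max_for_one_dataset(array):
--     """
--     @param array: 2d Array
--     @return: min and max values for x and y
--     Calulates min and max for an array with one dataset of points
--     """
--     minX = 0
--     maxX = 0
--     minY = 0
--     maxY = 0
--     for point in array:
--         newX = point[0]
--         newY = point[1]
--         minX = newX if newX < minX else minX
--         maxX = newX if newX > maxX else maxX
--         minY = newY if newY < minY else minY
--         maxY = newY if newY > maxY else maxY
--
--     return minX, maxX, minY, maxY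
--
-- def _get_min_max_for_multiple_datasets(arrays):
--     """
--     @param arrays: 3d Array
--     @return: min and max values for x and y
--     Calculates min and max values for an array with multiple datasets of points
--     """
--     minX = 0
--     maxX = 0
--     minY = 0
--     maxY = 0
--
--     for array in arrays:
--         newMinX, newMaxX, newMinY, newMaxY = _get_min_max_for_one_dataset(array)
--         minX = newMinX if newMinX < minX else minX
--         maxX = newMaxX if newMaxX > maxX else maxX
--         minY = newMinY if newMinY < minY else minY
--         maxY = newMaxY if newMaxY > maxY else maxY
--
--     return minX, maxX, minY, maxY
-- ===== SOURCE B (Python) =====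
-- def _get_min_max_for_multiple_datasets(arrays):
--     xs = [0] + [point[0] for array in arrays for point in array]
--     ys = [0] + [point[1] for array in arrays for point in array]
--     return min(xs), max(xs), min(ys), max(ys)
-- ===== Notes on version B (the rewrite author's own statement) =====
-- stated objective: idiomatic
-- what changed: Replaced A's running four-accumulator merge of per-dataset extrema by flattening all x and y coordinates (seeded with the 0 baseline) into two lists and taking built-in min/max of each.
import Mathlib
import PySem

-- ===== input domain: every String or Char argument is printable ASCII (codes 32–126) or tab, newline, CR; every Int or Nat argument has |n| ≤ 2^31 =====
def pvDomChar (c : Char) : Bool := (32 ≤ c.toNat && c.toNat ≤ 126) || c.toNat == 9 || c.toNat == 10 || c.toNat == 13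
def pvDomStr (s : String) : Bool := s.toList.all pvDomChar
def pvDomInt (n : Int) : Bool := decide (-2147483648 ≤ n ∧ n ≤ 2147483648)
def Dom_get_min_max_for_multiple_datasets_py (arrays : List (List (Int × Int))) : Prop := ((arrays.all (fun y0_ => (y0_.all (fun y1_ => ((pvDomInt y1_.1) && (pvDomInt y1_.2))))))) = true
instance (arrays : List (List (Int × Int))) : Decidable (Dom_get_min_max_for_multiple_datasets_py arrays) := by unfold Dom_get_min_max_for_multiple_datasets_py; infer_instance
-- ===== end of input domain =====

-- B replaces A's per-dataset extrema merge by flattening all x/y coordinates (with the 0 baseline) and taking min/max of each list (idiomatic; same cost).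


-- ===== PORT A =====
-- helper _get_min_max_for_one_dataset: fold over the points of one dataset from (0,0,0,0)
def get_min_max_for_one_dataset_py (array : List (Int × Int)) : Int × Int × Int × Int :=
  array.foldl
    (fun s point =>
      let newX := point.1
      let newY := point.2
      ((if newX < s.1 then newX else s.1),
       (if newX > s.2.1 then newX else s.2.1),
       (if newY < s.2.2.1 then newY else s.2.2.1),
       (if newY > s.2.2.2 then newY else s.2.2.2)))
    (0, 0, 0, 0)

def get_min_max_for_multiple_datasets_py (arrays : List (List (Int × Int))) : Int × Int × Int × Int :=
  arrays.foldl
    (fun s array =>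
      let n := get_min_max_for_one_dataset_py array
      ((if n.1 < s.1 then n.1 else s.1),
       (if n.2.1 > s.2.1 then n.2.1 else s.2.1),
       (if n.2.2.1 < s.2.2.1 then n.2.2.1 else s.2.2.1),
       (if n.2.2.2 > s.2.2.2 then n.2.2.2 else s.2.2.2)))
    (0, 0, 0, 0)

-- ===== PORT B =====
-- flatten all coordinates with the 0 baseline, then Python min/max of each list;
-- both lists begin with 0, so min?/max? are always `some` and .getD 0 is exact.
def get_min_max_for_multiple_datasets_py_alt (arrays : List (List (Int × Int))) : Int × Int × Int × Int :=
  let xs : List Int := 0 :: arrays.flatMap (fun array => array.map (fun point => point.1))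
  let ys : List Int := 0 :: arrays.flatMap (fun array => array.map (fun point => point.2))
  ((PySem.List.min? xs (fun v => v)).getD 0,
   (PySem.List.max? xs (fun v => v)).getD 0,
   (PySem.List.min? ys (fun v => v)).getD 0,
   (PySem.List.max? ys (fun v => v)).getD 0)

-- ===== PRECONDITION & SPEC =====
def Spec_get_min_max_for_multiple_datasets_py (arrays : List (List (Int × Int))) (out : Int × Int × Int × Int) : Prop := out = get_min_max_for_multiple_datasets_py_alt arrays
instance (arrays : List (List (Int × Int))) (out : Int × Int × Int × Int) : Decidable (Spec_get_min_max_for_multiple_datasets_py arrays out) := by unfold Spec_get_min_max_for_multiple_datasets_py; infer_instance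

-- ===== CLAIM =====
def Claim_equal_get_min_max_for_multiple_datasets_py : Prop := ∀ (arrays : List (List (Int × Int))), Dom_get_min_max_for_multiple_datasets_py arrays → Spec_get_min_max_for_multiple_datasets_py arrays (get_min_max_for_multiple_datasets_py arrays)

-- ===== LEMMAS AND PROOFS =====

-- the point step of A's inner helper
def pvStep (t : Int × Int × Int × Int) (point : Int × Int) : Int × Int × Int × Int :=
  ((if point.1 < t.1 then point.1 else t.1),
   (if point.1 > t.2.1 then point.1 else t.2.1),
   (if point.2 < t.2.2.1 then point.2 else t.2.2.1),
   (if point.2 > t.2.2.2 then point.2 else t.2.2.2))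

-- A's combine of state s with a helper result n
def pvComb (s n : Int × Int × Int × Int) : Int × Int × Int × Int :=
  ((if n.1 < s.1 then n.1 else s.1),
   (if n.2.1 > s.2.1 then n.2.1 else s.2.1),
   (if n.2.2.1 < s.2.2.1 then n.2.2.1 else s.2.2.1),
   (if n.2.2.2 > s.2.2.2 then n.2.2.2 else s.2.2.2))

def pvInv (s : Int × Int × Int × Int) : Prop :=
  s.1 ≤ 0 ∧ 0 ≤ s.2.1 ∧ s.2.2.1 ≤ 0 ∧ 0 ≤ s.2.2.2

theorem pvComb_step (s z : Int × Int × Int × Int) (p : Int × Int) :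
    pvComb s (pvStep z p) = pvStep (pvComb s z) p := by
  obtain ⟨s1, s2, s3, s4⟩ := s
  obtain ⟨z1, z2, z3, z4⟩ := z
  simp only [pvComb, pvStep, Prod.mk.injEq]
  refine ⟨?_, ?_, ?_, ?_⟩ <;> split_ifs <;> omega

theorem pvComb_foldl (l : List (Int × Int)) (s z : Int × Int × Int × Int) :
    pvComb s (l.foldl pvStep z) = l.foldl pvStep (pvComb s z) := by
  induction l generalizing z with
  | nil => rfl
  | cons p l ih => simp only [List.foldl_cons, ih, pvComb_step]

theorem pvComb_zero (s : Int × Int × Int × Int) (hs : pvInv s) :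
    pvComb s (0, 0, 0, 0) = s := by
  obtain ⟨s1, s2, s3, s4⟩ := s
  simp only [pvInv] at hs
  obtain ⟨h1, h2, h3, h4⟩ := hs
  simp only [pvComb, Prod.mk.injEq]
  refine ⟨?_, ?_, ?_, ?_⟩ <;> split_ifs <;> omega

theorem pvStep_inv (t : Int × Int × Int × Int) (p : Int × Int) (ht : pvInv t) :
    pvInv (pvStep t p) := by
  obtain ⟨h1, h2, h3, h4⟩ := ht
  simp only [pvStep, pvInv]
  refine ⟨?_, ?_, ?_, ?_⟩ <;> split_ifs <;> omega

theorem pvFoldl_inv (l : List (Int × Int)) (t : Int × Int × Int × Int) (ht : pvInv t) :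
    pvInv (l.foldl pvStep t) := by
  induction l generalizing t with
  | nil => exact ht
  | cons p l ih => exact ih _ (pvStep_inv t p ht)

-- A equals one flat fold of pvStep over the concatenation of its datasets
theorem pvA_flat (arrays : List (List (Int × Int))) (s : Int × Int × Int × Int) (hs : pvInv s) :
    arrays.foldl (fun s array => pvComb s (get_min_max_for_one_dataset_py array)) s
      = (arrays.flatMap (fun a => a)).foldl pvStep s := by
  induction arrays generalizing s with
  | nil => rfl
  | cons a l ih =>
    simp only [List.foldl_cons, List.flatMap_cons, List.foldl_append]
    have h1 : pvComb s (get_min_max_for_one_dataset_py a) = a.foldl pvStep s := by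
      show pvComb s (a.foldl pvStep (0, 0, 0, 0)) = a.foldl pvStep s
      rw [pvComb_foldl, pvComb_zero s hs]
    rw [h1]
    exact ih _ (pvFoldl_inv a s hs)

-- the flat pvStep fold computes componentwise running min/max over the coordinates
theorem pvFlat_minmax (pts : List (Int × Int)) (s : Int × Int × Int × Int) :
    pts.foldl pvStep s
      = ((pts.map Prod.fst).foldl min s.1,
         (pts.map Prod.fst).foldl max s.2.1,
         (pts.map Prod.snd).foldl min s.2.2.1,
         (pts.map Prod.snd).foldl max s.2.2.2) := by
  induction pts generalizing s with
  | nil => rfl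
  | cons p l ih =>
    obtain ⟨s1, s2, s3, s4⟩ := s
    simp only [List.foldl_cons, List.map_cons, ih]
    have e1 : pvStep (s1, s2, s3, s4) p
        = (min s1 p.1, max s2 p.1, min s3 p.2, max s4 p.2) := by
      simp only [pvStep, Prod.mk.injEq]
      refine ⟨?_, ?_, ?_, ?_⟩ <;> split_ifs <;> omega
    rw [e1]

theorem pvA_eq (arrays : List (List (Int × Int))) :
    get_min_max_for_multiple_datasets_py arrays = get_min_max_for_multiple_datasets_py_alt arrays := by
  have hA : get_min_max_for_multiple_datasets_py arrays
      = (arrays.flatMap (fun a => a)).foldl pvStep (0, 0, 0, 0) := by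
    show arrays.foldl (fun s array => pvComb s (get_min_max_for_one_dataset_py array)) (0, 0, 0, 0)
        = (arrays.flatMap (fun a => a)).foldl pvStep (0, 0, 0, 0)
    exact pvA_flat arrays (0, 0, 0, 0) ⟨le_refl 0, le_refl 0, le_refl 0, le_refl 0⟩
  rw [hA, pvFlat_minmax]
  have hx : (arrays.flatMap (fun a => a)).map Prod.fst
      = arrays.flatMap (fun array => array.map (fun point => point.1)) := by
    simp only [List.map_flatMap]
  have hy : (arrays.flatMap (fun a => a)).map Prod.snd
      = arrays.flatMap (fun array => array.map (fun point => point.2)) := by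
    simp only [List.map_flatMap]
  simp only [get_min_max_for_multiple_datasets_py_alt, PySem.List.min?_id_cons,
    PySem.List.max?_id_cons, Option.getD_some, hx, hy]

-- ===== VERDICT =====
theorem get_min_max_for_multiple_datasets_py_spec : Claim_equal_get_min_max_for_multiple_datasets_py := by
  intro arrays _
  exact pvA_eq arrays
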